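-- pv_equiv track=rewrite | github.com/jramaswami/Binary_Search_Python | minimum_size_of_two_non_overlapping_intervals.py | solve
-- ===== SOURCE A (Python) =====
-- from itertools import accumulate
-- from math import inf
-- from collections import namedtuple
-- from operator import attrgetter
--
-- Interval = namedtuple('Interval', ['start', 'end'])
--
-- def binsearch(intervals, interv):
--     lo = 0
--     hi = len(intervals) - 1
--     result = -1
--     while lo <= hi:
--         mid = (lo + hi) // 2
--         if intervals[mid].end < interv.start:
--             result = max(result, mid)
--             lo = mid + 1
--         else:
--             hi = mid - 1
--
--     return result
--
-- def solve(intervals):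
--     intervals0 = sorted((Interval(*i) for i in intervals), key=attrgetter('end'))
--     deltas = [i.end - i.start + 1 for i in intervals0]
--     deltas_prefix = list(accumulate(deltas, min))
--     soln = inf
--     for index, interv in enumerate(intervals0[::-1], start=-(len(intervals0) - 1)):
--         # Find the first element that ends before this interval starts.
--         d = interv.end - interv.start + 1
--         left_index = binsearch(intervals0, interv)
--         if left_index >= 0:
--             soln = min(soln, d + deltas_prefix[left_index])
--     return 0 if soln == inf else soln
-- ===== SOURCE B (Python) =====
-- def solve(intervals):
--     best = None
--     for (s1, e1) in intervals:
--         for (s2, e2) in intervals: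
--             if e2 < s1:
--                 cand = (e1 - s1 + 1) + (e2 - s2 + 1)
--                 if best is None or cand < best:
--                     best = cand
--     return 0 if best is None else best
-- ===== Notes on version B (the rewrite author's own statement) =====
-- stated objective: simpler
-- what changed: Replaces the sort + per-interval binary search + prefix-min-table pipeline by a direct double loop over all ordered pairs, taking the minimum size sum over pairs where one interval ends strictly before the other starts.
import Mathlib
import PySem

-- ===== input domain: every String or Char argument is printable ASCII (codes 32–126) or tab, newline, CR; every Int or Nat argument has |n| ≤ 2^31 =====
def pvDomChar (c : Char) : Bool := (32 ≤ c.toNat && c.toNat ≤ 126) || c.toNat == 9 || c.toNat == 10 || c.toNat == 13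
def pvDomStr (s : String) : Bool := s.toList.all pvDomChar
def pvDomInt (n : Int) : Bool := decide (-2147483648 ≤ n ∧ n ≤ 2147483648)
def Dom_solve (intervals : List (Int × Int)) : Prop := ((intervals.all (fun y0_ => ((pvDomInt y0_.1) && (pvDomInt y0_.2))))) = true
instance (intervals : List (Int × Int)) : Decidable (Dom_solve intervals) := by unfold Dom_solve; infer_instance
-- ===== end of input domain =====

-- B replaces A's sort + binary search + prefix-min table by a plain double loop over pairs: simpler, not faster.

-- ===== PORT A =====
-- the 'while lo <= hi' loop of Python's binsearch; fuel only makes the recursion structural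
-- (xs.length is always enough fuel, proved below), it changes no computed value
def binsearchLoop (xs : List (Int × Int)) (s : Int) : Nat → Int → Int → Int → Int
  | 0, _, _, result => result
  | fuel + 1, lo, hi, result =>
    if lo ≤ hi then
      let mid := PySem.Int.floordiv (lo + hi) 2
      -- intervals[mid]: mid is always in range when the loop runs (0 ≤ lo ≤ mid ≤ hi ≤ len-1), so .getD is exact
      if ((PySem.List.pyGet? xs mid).getD (0, 0)).2 < s then
        binsearchLoop xs s fuel (mid + 1) hi (max result mid)
      else
        binsearchLoop xs s fuel lo (mid - 1) result
    else result

def binsearch (xs : List (Int × Int)) (interv : Int × Int) : Int :=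
  binsearchLoop xs interv.1 xs.length 0 ((xs.length : Int) - 1) (-1)

-- itertools.accumulate(deltas, min): running minimum (second argument is the running state, initially absent)
def accumMin : List Int → Option Int → List Int
  | [], _ => []
  | d :: rest, none => d :: accumMin rest (some d)
  | d :: rest, some m => min m d :: accumMin rest (some (min m d))

-- the body of A's for-loop (soln = none plays the role of math.inf)
def solveStep (L' : List (Int × Int)) (dp : List Int) (soln : Option Int) (interv : Int × Int) : Option Int :=
  let d := interv.2 - interv.1 + 1
  let left_index := binsearch L' interv
  if left_index ≥ 0 then
    let x := d + (PySem.List.pyGet? dp left_index).getD 0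
    some (match soln with | none => x | some v => min v x)
  else soln

def solve (intervals : List (Int × Int)) : Int :=
  let intervals0 := PySem.List.sorted intervals (fun i => i.2) false
  let deltas := intervals0.map (fun i => i.2 - i.1 + 1)
  let deltas_prefix := accumMin deltas none
  -- for index, interv in enumerate(intervals0[::-1], start=…): 'index' is never used by the body
  let soln := ((PySem.List.slice? intervals0 none none (-1)).getD []).foldl
      (solveStep intervals0 deltas_prefix) none
  match soln with | none => 0 | some v => v

-- ===== PORT B =====
-- inner loop of Source B: try b as the earlier interval for the fixed a
def altInner (a : Int × Int) (best : Option Int) (b : Int × Int) : Option Int :=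
  if b.2 < a.1 then
    let cand := (a.2 - a.1 + 1) + (b.2 - b.1 + 1)
    match best with
    | none => some cand
    | some v => if cand < v then some cand else some v
  else best

def solve_alt (intervals : List (Int × Int)) : Int :=
  let best := intervals.foldl (fun acc a => intervals.foldl (altInner a) acc) none
  match best with | none => 0 | some v => v

-- ===== PRECONDITION & SPEC =====
def Spec_solve (intervals : List (Int × Int)) (out : Int) : Prop := out = solve_alt intervals
instance (intervals : List (Int × Int)) (out : Int) : Decidable (Spec_solve intervals out) := by unfold Spec_solve; infer_instance

-- ===== CLAIM (what is proved, stated in full; the proofs are below) =====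
def Claim_equal_solve : Prop := ∀ (intervals : List (Int × Int)), Dom_solve intervals → Spec_solve intervals (solve intervals)

-- ===== LEMMAS AND PROOFS =====

-- 'min with infinity': none plays math.inf
def omin : Option Int → Option Int → Option Int
  | none, b => b
  | some v, none => some v
  | some v, some w => some (min v w)

-- running-minimum step (always returns some)
def mmin (acc : Option Int) (y : Int) : Option Int :=
  some (match acc with | none => y | some v => min v y)

def runMin (v : Option Int) (l : List Int) : Option Int := l.foldl mmin v

-- minimum (with infinity) of f over a list
def bigmin {α : Type} (f : α → Option Int) (l : List α) : Option Int :=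
  l.foldl (fun a x => omin a (f x)) none

def pvSz (i : Int × Int) : Int := i.2 - i.1 + 1

-- candidate value of the ordered pair (a, b) in B
def gpair (a b : Int × Int) : Option Int :=
  if b.2 < a.1 then some (pvSz a + pvSz b) else none

-- candidate value of interval iv in A's loop
def fA (L' : List (Int × Int)) (dp : List Int) (iv : Int × Int) : Option Int :=
  if binsearch L' iv ≥ 0 then
    some (pvSz iv + (PySem.List.pyGet? dp (binsearch L' iv)).getD 0)
  else none

theorem omin_none_right (a : Option Int) : omin a none = a := by cases a <;> rfl

theorem omin_assoc (a b c : Option Int) : omin (omin a b) c = omin a (omin b c) := by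
  cases a <;> cases b <;> cases c <;> simp [omin, min_assoc]

theorem omin_comm (a b : Option Int) : omin a b = omin b a := by
  cases a <;> cases b <;> simp [omin, min_comm]

theorem foldl_omin {α : Type} (f : α → Option Int) (l : List α) (acc : Option Int) :
    l.foldl (fun a x => omin a (f x)) acc = omin acc (bigmin f l) := by
  induction l generalizing acc with
  | nil => simp [bigmin, omin_none_right]
  | cons x t ih =>
    simp only [bigmin, List.foldl_cons] at *
    rw [ih (omin acc (f x)), ih (omin none (f x))]
    show omin (omin acc (f x)) (bigmin f t) = omin acc (omin (omin none (f x)) (bigmin f t))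
    rw [omin_assoc]
    rfl

theorem bigmin_cons {α : Type} (f : α → Option Int) (x : α) (t : List α) :
    bigmin f (x :: t) = omin (f x) (bigmin f t) := by
  show (x :: t).foldl (fun a x => omin a (f x)) none = _
  rw [List.foldl_cons, foldl_omin]
  rfl

theorem bigmin_perm {α : Type} (f : α → Option Int) {l l' : List α} (h : l.Perm l') :
    bigmin f l = bigmin f l' := by
  induction h with
  | nil => rfl
  | cons x _ ih => rw [bigmin_cons, bigmin_cons, ih]
  | swap x y t =>
    rw [bigmin_cons, bigmin_cons, bigmin_cons, bigmin_cons, ← omin_assoc, ← omin_assoc,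
      omin_comm (f y) (f x)]
  | trans _ _ ih1 ih2 => rw [ih1, ih2]

theorem foldl_omin_perm {α : Type} (f : α → Option Int) {l l' : List α} (h : l.Perm l')
    (acc : Option Int) :
    l.foldl (fun a x => omin a (f x)) acc = l'.foldl (fun a x => omin a (f x)) acc := by
  rw [foldl_omin, foldl_omin, bigmin_perm f h]

theorem altInner_eq (a : Int × Int) (acc : Option Int) (b : Int × Int) :
    altInner a acc b = omin acc (gpair a b) := by
  rcases acc with _ | v <;> simp only [altInner, gpair, pvSz, omin] <;> split_ifs <;>
    simp [min_def] <;> omega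

theorem solveStep_eq (L' : List (Int × Int)) (dp : List Int) (soln : Option Int)
    (iv : Int × Int) : solveStep L' dp soln iv = omin soln (fA L' dp iv) := by
  rcases soln with _ | v <;> simp only [solveStep, fA, pvSz, omin] <;> split_ifs <;> rfl

-- discard pairs that fail the test: bigmin over an if-guard is bigmin over the filter
theorem bigmin_guard {α : Type} (p : α → Bool) (h : α → Option Int) (l : List α) :
    bigmin (fun x => if p x then h x else none) l = bigmin h (l.filter p) := by
  induction l with
  | nil => rfl
  | cons x t ih =>
    rw [bigmin_cons]
    by_cases hx : p x
    · simp only [List.filter_cons, hx, if_pos, bigmin_cons, ih]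
    · simp only [List.filter_cons, hx, Bool.false_eq_true, ih]
      simp [omin]

theorem foldl_omin_map_mmin (d : Int) {α : Type} (f : α → Int) (m : List α) (v : Option Int) :
    m.foldl (fun a b => omin a (some (d + f b))) (v.map (d + ·)) =
      ((m.map f).foldl mmin v).map (d + ·) := by
  induction m generalizing v with
  | nil => rfl
  | cons x t ih =>
    have hstep : omin (v.map (d + ·)) (some (d + f x)) = (mmin v (f x)).map (d + ·) := by
      cases v <;> simp [omin, mmin, min_def] <;> omega
    simp only [List.foldl_cons, List.map_cons, hstep, ih]

theorem bigmin_some_map (d : Int) {α : Type} (f : α → Int) (m : List α) :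
    bigmin (fun b => some (d + f b)) m = (runMin none (m.map f)).map (d + ·) := by
  have := foldl_omin_map_mmin d f m none
  simpa [bigmin, runMin] using this

theorem runMin_some_isSome (l : List Int) (w : Int) : ∃ u, runMin (some w) l = some u := by
  induction l generalizing w with
  | nil => exact ⟨w, rfl⟩
  | cons x t ih => exact ih (min w x)

theorem accumMin_length (l : List Int) (v : Option Int) : (accumMin l v).length = l.length := by
  induction l generalizing v with
  | nil => cases v <;> rfl
  | cons x t ih => cases v <;> simp [accumMin, ih]

theorem accumMin_getElem (l : List Int) (v : Option Int) (k : Nat) (h : k < l.length) :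
    (accumMin l v)[k]'(by rw [accumMin_length]; exact h) =
      (runMin v (l.take (k + 1))).getD 0 := by
  induction l generalizing v k with
  | nil => simp at h
  | cons x t ih =>
    cases v with
    | none =>
      cases k with
      | zero => simp [accumMin, runMin, mmin]
      | succ k => simpa [accumMin, runMin, mmin] using ih (some x) k (by simpa using h)
    | some m =>
      cases k with
      | zero => simp [accumMin, runMin, mmin]
      | succ k => simpa [accumMin, runMin, mmin] using ih (some (min m x)) k (by simpa using h)

-- in a list sorted by end, the intervals ending before s form a prefix
theorem sorted_filter_eq_take (L : List (Int × Int)) (s : Int)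
    (hs : L.Pairwise (fun x y => x.2 ≤ y.2)) :
    L.filter (fun b => decide (b.2 < s)) = L.take (L.countP (fun b => decide (b.2 < s))) := by
  induction L with
  | nil => rfl
  | cons x t ih =>
    rcases List.pairwise_cons.mp hs with ⟨hx, ht⟩
    by_cases hxs : x.2 < s
    · simp [hxs, ih ht]
    · have hall : ∀ y ∈ t, ¬ (y.2 < s) := fun y hy => by have := hx y hy; omega
      have htf : t.filter (fun b => decide (b.2 < s)) = [] :=
        List.filter_eq_nil_iff.mpr (by intro y hy; simpa using hall y hy)
      have htc : t.countP (fun b => decide (b.2 < s)) = 0 :=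
        List.countP_eq_zero.mpr (fun y hy => by simpa using hall y hy)
      simp [hxs, htf, htc]

theorem sorted_getElem_lt_iff (L : List (Int × Int)) (s : Int)
    (hs : L.Pairwise (fun x y => x.2 ≤ y.2)) (i : Nat) (h : i < L.length) :
    L[i].2 < s ↔ i < L.countP (fun b => decide (b.2 < s)) := by
  set p : (Int × Int) → Bool := fun b => decide (b.2 < s) with hp
  set c := L.countP p with hc
  have hcle : c ≤ L.length := List.countP_le_length
  have hft : L.filter p = L.take c := sorted_filter_eq_take L s hs
  constructor
  · intro hlt
    by_contra hge
    rw [Nat.not_lt] at hge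
    have hmem : L[i] ∈ L.drop c := by
      have hd : (L.drop c)[i - c]'(by simp; omega) = L[i] := by
        rw [List.getElem_drop]; congr 1; omega
      rw [← hd]; exact List.getElem_mem _
    have hctake : (L.take c).countP p = c := by
      have hmm : ∀ a ∈ L.take c, p a = true := by
        intro a ha
        rw [← hft] at ha
        exact (List.mem_filter.mp ha).2
      rw [List.countP_eq_length.mpr hmm, List.length_take]
      omega
    have hsplit : (L.take c).countP p + (L.drop c).countP p = c := by
      rw [← List.countP_append, List.take_append_drop]
    have hdrop0 : (L.drop c).countP p = 0 := by omega
    have hnp : ¬ (p L[i] = true) := fun hpe => (List.countP_eq_zero.mp hdrop0 _ hmem) hpe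
    simp [hp] at hnp
    omega
  · intro hic
    have hmem : L[i] ∈ L.filter p := by
      rw [hft]
      have ht : (L.take c)[i]'(by simp; omega) = L[i] := List.getElem_take
      rw [← ht]
      exact List.getElem_mem _
    have := List.of_mem_filter hmem
    simpa [hp] using this

-- the binary-search loop returns (count of ends < s) - 1; invariant: result = lo - 1,
-- 0 ≤ lo ≤ c and c - 1 ≤ hi ≤ len - 1
theorem binsearchLoop_eq (xs : List (Int × Int)) (s : Int)
    (hs : xs.Pairwise (fun x y => x.2 ≤ y.2)) :
    ∀ (fuel : Nat) (lo hi : Int),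
      (hi - lo + 1).toNat ≤ fuel → 0 ≤ lo →
      lo ≤ (xs.countP (fun b => decide (b.2 < s)) : Int) →
      (xs.countP (fun b => decide (b.2 < s)) : Int) - 1 ≤ hi →
      hi ≤ (xs.length : Int) - 1 →
      binsearchLoop xs s fuel lo hi (lo - 1) =
        (xs.countP (fun b => decide (b.2 < s)) : Int) - 1 := by
  intro fuel
  induction fuel with
  | zero =>
    intro lo hi hfuel hlo hloc hchi hhi
    simp only [binsearchLoop]
    omega
  | succ fuel ih =>
    intro lo hi hfuel hlo hloc hchi hhi
    by_cases hlh : lo ≤ hi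
    · have hmid := PySem.Int.floordiv_two_mid_bounds hlh
      have hclen : xs.countP (fun b => decide (b.2 < s)) ≤ xs.length := List.countP_le_length
      set mid := PySem.Int.floordiv (lo + hi) 2 with hmiddef
      have hmidlt : mid.toNat < xs.length := by omega
      have hget : PySem.List.pyGet? xs mid = some (xs[mid.toNat]'hmidlt) := by
        have hcast : mid = ((mid.toNat : Nat) : Int) := by omega
        conv_lhs => rw [hcast]
        rw [PySem.List.pyGet?_natCast]
        exact List.getElem?_eq_getElem hmidlt
      have hiff := sorted_getElem_lt_iff xs s hs mid.toNat hmidlt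
      show (if lo ≤ hi then
          if ((PySem.List.pyGet? xs mid).getD (0, 0)).2 < s then
            binsearchLoop xs s fuel (mid + 1) hi (max (lo - 1) mid)
          else binsearchLoop xs s fuel lo (mid - 1) (lo - 1)
        else lo - 1) = _
      rw [if_pos hlh, hget]
      simp only [Option.getD_some]
      by_cases hcond : (xs[mid.toNat]'hmidlt).2 < s
      · rw [if_pos hcond]
        have hmc : mid.toNat < xs.countP (fun b => decide (b.2 < s)) := hiff.mp hcond
        have hmax : max (lo - 1) mid = (mid + 1) - 1 := by omega
        rw [hmax]
        exact ih (mid + 1) hi (by omega) (by omega) (by omega) (by omega) (by omega)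
      · rw [if_neg hcond]
        have hmc : ¬ (mid.toNat < xs.countP (fun b => decide (b.2 < s))) :=
          fun hlt => hcond (hiff.mpr hlt)
        exact ih lo (mid - 1) (by omega) (by omega) (by omega) (by omega) (by omega)
    · show (if lo ≤ hi then _ else lo - 1) = _
      rw [if_neg hlh]
      omega

theorem binsearch_eq (xs : List (Int × Int)) (iv : Int × Int)
    (hs : xs.Pairwise (fun x y => x.2 ≤ y.2)) :
    binsearch xs iv = (xs.countP (fun b => decide (b.2 < iv.1)) : Int) - 1 := by
  have hcle : xs.countP (fun b => decide (b.2 < iv.1)) ≤ xs.length := List.countP_le_length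
  have h0 : ((-1 : Int)) = 0 - 1 := by omega
  rw [binsearch, h0]
  exact binsearchLoop_eq xs iv.1 hs xs.length 0 ((xs.length : Int) - 1) (by omega) (by omega)
    (by omega) (by omega) (by omega)

-- A's candidate for iv equals B's inner minimum over the whole (sorted) list
theorem fA_eq_bigmin (L' : List (Int × Int)) (iv : Int × Int)
    (hs : L'.Pairwise (fun x y => x.2 ≤ y.2)) :
    fA L' (accumMin (L'.map pvSz) none) iv = bigmin (gpair iv) L' := by
  set p : (Int × Int) → Bool := fun b => decide (b.2 < iv.1) with hp
  set c := L'.countP p with hc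
  have hcle : c ≤ L'.length := List.countP_le_length
  have hbs : binsearch L' iv = (c : Int) - 1 := binsearch_eq L' iv hs
  have hfilter : L'.filter p = L'.take c := sorted_filter_eq_take L' iv.1 hs
  have hrhs : bigmin (gpair iv) L' =
      (runMin none ((L'.map pvSz).take c)).map (pvSz iv + ·) := by
    have hg : gpair iv = fun b => if p b then some (pvSz iv + pvSz b) else none := by
      funext b
      by_cases hb : b.2 < iv.1 <;> simp [gpair, hp, hb]
    rw [hg, bigmin_guard, hfilter, bigmin_some_map, List.map_take]
  rcases Nat.eq_zero_or_pos c with hc0 | hcpos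
  · rw [hrhs, hc0]
    simp only [List.take_zero, runMin, List.foldl_nil, Option.map_none]
    rw [fA, hbs, hc0]
    norm_num
  · have hlen : c ≤ (L'.map pvSz).length := by simpa using hcle
    have hk : c - 1 < (L'.map pvSz).length := by omega
    have hidx : ((c : Int) - 1) = ((c - 1 : Nat) : Int) := by omega
    have hget : (PySem.List.pyGet? (accumMin (L'.map pvSz) none) ((c : Int) - 1)).getD 0 =
        (runMin none ((L'.map pvSz).take c)).getD 0 := by
      rw [hidx, PySem.List.pyGet?_natCast,
        List.getElem?_eq_getElem (by rw [accumMin_length]; exact hk)]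
      rw [Option.getD_some, accumMin_getElem (L'.map pvSz) none (c - 1) hk,
        Nat.sub_add_cancel hcpos]
    obtain ⟨x, t, hxt⟩ : ∃ x t, (L'.map pvSz).take c = x :: t := by
      cases htk : (L'.map pvSz).take c with
      | nil =>
        exfalso
        have hlen0 : ((L'.map pvSz).take c).length = 0 := by rw [htk]; rfl
        rw [List.length_take] at hlen0
        omega
      | cons x t => exact ⟨x, t, rfl⟩
    obtain ⟨u, hu⟩ : ∃ u, runMin none ((L'.map pvSz).take c) = some u := by
      rw [hxt]
      exact runMin_some_isSome t x
    rw [hrhs, hu, fA, hbs, if_pos (by omega), hget, hu]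
    rfl

theorem solve_eq_solve_alt (intervals : List (Int × Int)) :
    solve intervals = solve_alt intervals := by
  set L' := PySem.List.sorted intervals (fun i => i.2) false with hL'
  have hperm : L'.Perm intervals := PySem.List.sorted_perm intervals (fun i => i.2) false
  have hs : L'.Pairwise (fun x y => x.2 ≤ y.2) :=
    PySem.List.sorted_pairwise intervals (fun i => i.2)
  have hstep : solveStep L' (accumMin (L'.map pvSz) none) =
      fun a x => omin a (fA L' (accumMin (L'.map pvSz) none) x) :=
    funext fun a => funext fun x => solveStep_eq _ _ a x
  have hfa : (fun (a : Option Int) (x : Int × Int) =>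
        omin a (fA L' (accumMin (L'.map pvSz) none) x)) =
      fun a x => omin a (bigmin (gpair x) intervals) := by
    funext a x
    rw [fA_eq_bigmin L' x hs, bigmin_perm (gpair x) hperm]
  have halt : (fun (acc : Option Int) (a : Int × Int) => intervals.foldl (altInner a) acc) =
      fun a x => omin a (bigmin (gpair x) intervals) := by
    funext acc a
    have hai : altInner a = fun c b => omin c (gpair a b) :=
      funext fun c => funext fun b => altInner_eq a c b
    rw [hai, foldl_omin]
  show (match ((PySem.List.slice? L' none none (-1)).getD []).foldl
      (solveStep L' (accumMin (L'.map (fun i => i.2 - i.1 + 1)) none)) none with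
      | none => (0 : Int) | some v => v) =
    (match intervals.foldl (fun acc a => intervals.foldl (altInner a) acc) none with
      | none => (0 : Int) | some v => v)
  rw [PySem.List.slice?_none_none_neg_one, Option.getD_some,
    show (L'.map (fun i => i.2 - i.1 + 1)) = L'.map pvSz from rfl, hstep, hfa, halt,
    foldl_omin_perm _ (L'.reverse_perm.trans hperm)]

-- ===== VERDICT (by name: the statement is the Claim_ definition above) =====
theorem solve_spec : Claim_equal_solve := by
  intro intervals _
  exact solve_eq_solve_alt intervals
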